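-- pv_equiv track=rewrite | github.com/el-f/CS-Material-And-Snippets | Python Courses + Snippets/Snippets/max_path_sum_two_lists.py | mps_v2
-- ===== SOURCE A (Python) =====
-- def mps_v2(a, b):
--     i, j, A, B = 0, 0, 0, 0
--     while i < len(a) and j < len(b):
--         x, y = a[i], b[j]
--         if x == y:
--             A = B = max(A, B)
--         if x <= y:
--             i, A = i+1, A+x
--         if x >= y:
--             j, B = j+1, B+y
--     return max(A+sum(a[i:]), B+sum(b[j:]))
-- ===== SOURCE B (Python) =====
-- def mps_v2(a, b):
--     # Pass 1: record only the matched index pairs of the two-pointer comparison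
--     # (no sums are maintained here at all).
--     pairs = []
--     i = j = 0
--     while i < len(a) and j < len(b):
--         if a[i] == b[j]:
--             pairs.append((i, j))
--             i += 1
--             j += 1
--         elif a[i] < b[j]:
--             i += 1
--         else:
--             j += 1
--     # Pass 2: prefix-sum tables of both lists.
--     Pa, t = [0], 0
--     for x in a:
--         t += x
--         Pa.append(t)
--     Pb, t = [0], 0
--     for y in b:
--         t += y
--         Pb.append(t)
--     # Pass 3: fold over the segments delimited by the matched pairs, taking the
--     # better side of each segment via prefix-sum differences.
--     res = 0
--     pi = pj = 0
--     for ii, jj in pairs: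
--         res += max(Pa[ii] - Pa[pi], Pb[jj] - Pb[pj]) + a[ii]
--         pi, pj = ii + 1, jj + 1
--     return res + max(Pa[len(a)] - Pa[pi], Pb[len(b)] - Pb[pj])
-- ===== Notes on version B (the rewrite author's own statement) =====
-- stated objective: alternative
-- what changed: B is a three-staged-pass formulation: pass 1 records only the matched index pairs of the comparison walk (no sums), pass 2 builds prefix-sum tables of both lists, pass 3 folds over the segments between matched pairs taking max of prefix-sum differences; A instead maintains two globally-synced running totals merged with max inside one loop.
import Mathlib
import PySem

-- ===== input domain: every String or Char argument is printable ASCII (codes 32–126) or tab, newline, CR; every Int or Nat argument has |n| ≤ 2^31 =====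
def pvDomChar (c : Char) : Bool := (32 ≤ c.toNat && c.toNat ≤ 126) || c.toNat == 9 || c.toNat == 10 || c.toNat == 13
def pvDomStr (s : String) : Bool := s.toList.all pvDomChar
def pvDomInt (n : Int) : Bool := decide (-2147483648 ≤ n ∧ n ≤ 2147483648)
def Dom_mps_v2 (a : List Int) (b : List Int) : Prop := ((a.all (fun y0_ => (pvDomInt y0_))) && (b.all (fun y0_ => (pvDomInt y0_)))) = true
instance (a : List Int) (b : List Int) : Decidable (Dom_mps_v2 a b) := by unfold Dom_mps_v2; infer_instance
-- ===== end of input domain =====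

-- B replaces A's single synced-running-totals loop by three staged passes (matched index
-- pairs, prefix-sum tables, segment fold); objective: alternative decomposition, same O(n+m).


-- ===== PORT A =====
-- A's while loop over the remaining suffixes, carrying the two running totals ta, tb
-- (Python's A, B).  The three sequential ifs collapse to three exclusive cases
-- (x = y fires the first if and both advances; x < y only the i-advance; x > y only
-- the j-advance).  The fuel is len a + len b: each iteration consumes at least one
-- element, so the fuel-exhausted branch, which is the loop-exit expression
-- max(A + sum(a[i:]), B + sum(b[j:])), is only reached at the genuine loop exit.
def mps_v2_loopA : Nat → List Int → List Int → Int → Int → Int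
  | n+1, x::a, y::b, ta, tb =>
      if x = y then mps_v2_loopA n a b (max ta tb + x) (max ta tb + y)
      else if x ≤ y then mps_v2_loopA n a (y::b) (ta + x) tb
      else mps_v2_loopA n (x::a) b ta (tb + y)
  | _, a, b, ta, tb => max (ta + a.sum) (tb + b.sum)

def mps_v2 (a : List Int) (b : List Int) : Int :=
  mps_v2_loopA (a.length + b.length) a b 0 0

-- ===== PORT B =====
-- B's pass 1: the comparison walk recording only the matched index pairs; same fuel
-- scheme as A's loop (one element consumed per iteration), fuel-exhausted branch = [].
def mpsB_pairs : Nat → List Int → List Int → Nat → Nat → List (Nat × Nat)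
  | n+1, x::a, y::b, i, j =>
      if x = y then (i, j) :: mpsB_pairs n a b (i+1) (j+1)
      else if x < y then mpsB_pairs n a (y::b) (i+1) j
      else mpsB_pairs n (x::a) b i (j+1)
  | _, _, _, _, _ => []

-- B's pass 2: the prefix-sum table built by appending the running total (Python's
-- `Pa = [0]; t = 0; for x in a: t += x; Pa.append(t)`).
def mpsB_prefix (xs : List Int) : List Int :=
  (xs.foldl (fun (st : List Int × Int) x => (st.1 ++ [st.2 + x], st.2 + x)) ([0], 0)).1

-- B's pass 3: the for-loop over the pairs plus the final return expression, as a
-- recursion on the pairs list with state (res, pi, pj); the base case is B's return.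
-- Python's Pa[k] / a[ii] are ported as getD _ 0: every index reached is in range
-- (ii < len a, pi ≤ len a, and Pa has length len a + 1), so the default is never used.
def mpsB_reduce (a : List Int) (Pa Pb : List Int) (blen : Nat) :
    List (Nat × Nat) → Int → Nat → Nat → Int
  | [], res, pi, pj =>
      res + max (Pa.getD a.length 0 - Pa.getD pi 0) (Pb.getD blen 0 - Pb.getD pj 0)
  | (ii, jj) :: ps, res, pi, pj =>
      mpsB_reduce a Pa Pb blen ps
        (res + max (Pa.getD ii 0 - Pa.getD pi 0) (Pb.getD jj 0 - Pb.getD pj 0) + a.getD ii 0)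
        (ii+1) (jj+1)

def mps_v2_alt (a : List Int) (b : List Int) : Int :=
  mpsB_reduce a (mpsB_prefix a) (mpsB_prefix b) b.length
    (mpsB_pairs (a.length + b.length) a b 0 0) 0 0 0

-- ===== PRECONDITION & SPEC =====
def Spec_mps_v2 (a : List Int) (b : List Int) (out : Int) : Prop := out = mps_v2_alt a b
instance (a : List Int) (b : List Int) (out : Int) : Decidable (Spec_mps_v2 a b out) := by unfold Spec_mps_v2; infer_instance

-- ===== CLAIM (what is proved, stated in full; the proofs are below) =====
def Claim_equal_mps_v2 : Prop := ∀ (a : List Int) (b : List Int), Dom_mps_v2 a b → Spec_mps_v2 a b (mps_v2 a b)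

-- ===== LEMMAS AND PROOFS =====

-- The partial-sum list [t+x1, t+x1+x2, …] (proof-only characterisation of pass 2).
def pvPsums : Int → List Int → List Int
  | _, [] => []
  | t, x :: xs => (t + x) :: pvPsums (t + x) xs

theorem pvPrefix_foldl (xs : List Int) : ∀ (P : List Int) (t : Int),
    (xs.foldl (fun (st : List Int × Int) x => (st.1 ++ [st.2 + x], st.2 + x)) (P, t)).1
      = P ++ pvPsums t xs := by
  induction xs with
  | nil => intro P t; simp [pvPsums]
  | cons x xs ih =>
      intro P t
      simp only [List.foldl_cons, pvPsums]
      rw [ih]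
      simp

theorem pvPsums_getD (xs : List Int) : ∀ (t : Int) (k : Nat), k < xs.length →
    (pvPsums t xs).getD k 0 = t + (xs.take (k+1)).sum := by
  induction xs with
  | nil => intro t k h; simp at h
  | cons x xs ih =>
      intro t k h
      cases k with
      | zero => simp [pvPsums]
      | succ k =>
          simp only [pvPsums, List.getD_cons_succ, List.take_succ_cons, List.sum_cons]
          rw [ih (t + x) k (by simpa using h)]
          ring

theorem pvPrefix_getD (a : List Int) (k : Nat) (hk : k ≤ a.length) :
    (mpsB_prefix a).getD k 0 = (a.take k).sum := by
  unfold mpsB_prefix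
  rw [pvPrefix_foldl]
  cases k with
  | zero => simp
  | succ k =>
      have hk' : k < a.length := by omega
      simpa using pvPsums_getD a 0 k hk'

-- Facts extracted from a.drop i = x :: t.
theorem pvDropCons (a : List Int) (i : Nat) (x : Int) (t : List Int)
    (h : a.drop i = x :: t) :
    t = a.drop (i+1) ∧ i < a.length ∧ a.getD i 0 = x ∧
      (a.take (i+1)).sum = (a.take i).sum + x := by
  have hlen : i < a.length := by
    by_contra hc
    rw [List.drop_eq_nil_of_le (by omega)] at h
    simp at h
  have hget : a[i]? = some x := by
    have h0 : (a.drop i)[0]? = some x := by rw [h]; rfl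
    rw [List.getElem?_drop] at h0
    simpa using h0
  refine ⟨?_, hlen, ?_, ?_⟩
  · have : a.drop (i+1) = (a.drop i).drop 1 := by
      rw [List.drop_drop]
    rw [this, h]
    rfl
  · simp [List.getD, hget]
  · rw [List.take_add_one, hget]
    simp

-- Shift invariance of A's loop: adding a constant to both totals adds it to the result.
theorem pvLoopA_shift (n : Nat) : ∀ (as bs : List Int) (c u v : Int),
    mps_v2_loopA n as bs (c + u) (c + v) = c + mps_v2_loopA n as bs u v := by
  induction n with
  | zero => intro as bs c u v; simp [mps_v2_loopA]; omega
  | succ n ih =>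
      intro as bs c u v
      match as, bs with
      | [], bs => simp [mps_v2_loopA]; omega
      | x::as, [] => simp [mps_v2_loopA]; omega
      | x::as, y::bs =>
          rw [mps_v2_loopA, mps_v2_loopA]
          by_cases hxy : x = y
          · rw [if_pos hxy, if_pos hxy]
            have h1 : max (c + u) (c + v) + x = c + (max u v + x) := by omega
            have h2 : max (c + u) (c + v) + y = c + (max u v + y) := by omega
            rw [h1, h2, ih]
          · by_cases hle : x ≤ y
            · rw [if_neg hxy, if_neg hxy, if_pos hle, if_pos hle, add_assoc, ih]
            · rw [if_neg hxy, if_neg hxy, if_neg hle, if_neg hle, add_assoc, ih]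

-- The key invariant: pass 3 applied to the pairs produced from the suffixes at (i, j),
-- with segment starts (pi, pj), equals res plus A's loop started from the prefix-sum
-- differences.  Holds for every fuel n (both loops exhaust identically).
theorem pvKey (a b : List Int) : ∀ (n : Nat) (as bs : List Int) (i j pi pj : Nat) (res : Int),
    as = a.drop i → bs = b.drop j → i ≤ a.length → j ≤ b.length →
    pi ≤ a.length → pj ≤ b.length →
    mpsB_reduce a (mpsB_prefix a) (mpsB_prefix b) b.length (mpsB_pairs n as bs i j) res pi pj
      = res + mps_v2_loopA n as bs
          ((a.take i).sum - (a.take pi).sum) ((b.take j).sum - (b.take pj).sum) := by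
  intro n
  induction n with
  | zero =>
      intro as bs i j pi pj res ha hb hi hj hpi hpj
      simp only [mpsB_pairs, mpsB_reduce, mps_v2_loopA]
      rw [pvPrefix_getD a a.length (le_refl _), pvPrefix_getD a pi hpi,
          pvPrefix_getD b b.length (le_refl _), pvPrefix_getD b pj hpj]
      have hsa : (a.take a.length).sum = (a.take i).sum + as.sum := by
        rw [ha, List.take_length, ← List.sum_append, List.take_append_drop]
      have hsb : (b.take b.length).sum = (b.take j).sum + bs.sum := by
        rw [hb, List.take_length, ← List.sum_append, List.take_append_drop]
      omega
  | succ n ih =>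
      intro as bs i j pi pj res ha hb hi hj hpi hpj
      match as, bs with
      | [], bs =>
          simp only [mpsB_pairs, mpsB_reduce, mps_v2_loopA]
          rw [pvPrefix_getD a a.length (le_refl _), pvPrefix_getD a pi hpi,
              pvPrefix_getD b b.length (le_refl _), pvPrefix_getD b pj hpj]
          have hia : a.length ≤ i := by
            have := congrArg List.length ha
            simp at this
            omega
          have hsa : (a.take a.length).sum = (a.take i).sum := by
            rw [List.take_length, List.take_of_length_le hia]
          have hsb : (b.take b.length).sum = (b.take j).sum + bs.sum := by
            rw [hb, List.take_length, ← List.sum_append, List.take_append_drop]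
          simp only [List.sum_nil]
          omega
      | x::as, [] =>
          simp only [mpsB_pairs, mpsB_reduce, mps_v2_loopA]
          rw [pvPrefix_getD a a.length (le_refl _), pvPrefix_getD a pi hpi,
              pvPrefix_getD b b.length (le_refl _), pvPrefix_getD b pj hpj]
          have hsa : (a.take a.length).sum = (a.take i).sum + (x::as).sum := by
            rw [ha, List.take_length, ← List.sum_append, List.take_append_drop]
          have hjb : b.length ≤ j := by
            have := congrArg List.length hb
            simp at this
            omega
          have hsb : (b.take b.length).sum = (b.take j).sum := by
            rw [List.take_length, List.take_of_length_le hjb]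
          simp only [List.sum_nil]
          omega
      | x::as, y::bs =>
          obtain ⟨has, hilt, hgetx, htka⟩ := pvDropCons a i x as ha.symm
          obtain ⟨hbs, hjlt, hgety, htkb⟩ := pvDropCons b j y bs hb.symm
          rw [mpsB_pairs, mps_v2_loopA]
          by_cases hxy : x = y
          · rw [if_pos hxy, if_pos hxy, mpsB_reduce]
            rw [ih as bs (i+1) (j+1) (i+1) (j+1) _ has hbs (by omega) (by omega) (by omega) (by omega)]
            rw [pvPrefix_getD a i (by omega), pvPrefix_getD b j (by omega),
                pvPrefix_getD a pi hpi, pvPrefix_getD b pj hpj, hgetx]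
            have hz1 : (a.take (i+1)).sum - (a.take (i+1)).sum = (0:Int) := by omega
            have hz2 : (b.take (j+1)).sum - (b.take (j+1)).sum = (0:Int) := by omega
            rw [hz1, hz2]
            have hc : max ((a.take i).sum - (a.take pi).sum) ((b.take j).sum - (b.take pj).sum) + x
                = (max ((a.take i).sum - (a.take pi).sum) ((b.take j).sum - (b.take pj).sum) + x) + 0 := by omega
            have hc' : max ((a.take i).sum - (a.take pi).sum) ((b.take j).sum - (b.take pj).sum) + y
                = (max ((a.take i).sum - (a.take pi).sum) ((b.take j).sum - (b.take pj).sum) + x) + 0 := by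
              rw [hxy] at *; omega
            rw [hc, hc', pvLoopA_shift]
            omega
          · by_cases hlt : x < y
            · rw [if_neg hxy, if_pos hlt, if_neg hxy, if_pos (le_of_lt hlt)]
              rw [ih as (y::bs) (i+1) j pi pj res has hb (by omega) hj hpi hpj]
              rw [htka]
              have : (a.take i).sum + x - (a.take pi).sum
                  = (a.take i).sum - (a.take pi).sum + x := by omega
              rw [this]
            · have hgt : y < x := by omega
              rw [if_neg hxy, if_neg hlt, if_neg hxy, if_neg (by omega)]
              rw [ih (x::as) bs i (j+1) pi pj res ha hbs hi (by omega) hpi hpj]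
              rw [htkb]
              have : (b.take j).sum + y - (b.take pj).sum
                  = (b.take j).sum - (b.take pj).sum + y := by omega
              rw [this]

-- ===== VERDICT (by name: the statement is the Claim_ definition above) =====
theorem mps_v2_spec : Claim_equal_mps_v2 := by
  intro a b _
  unfold Spec_mps_v2 mps_v2 mps_v2_alt
  have h := pvKey a b (a.length + b.length) a b 0 0 0 0 0
    (by simp) (by simp) (by omega) (by omega) (by omega) (by omega)
  simp only [List.take_zero, List.sum_nil, sub_self, zero_add] at h
  exact h.symm
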